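-- pv_equiv track=rewrite | github.com/AssasinRay/LDA-Apriori-Topic-model | apriori.py | Get_Prune_Pattern
-- ===== SOURCE A (Python) =====
-- def Get_Prune_Pattern(cur_pattern, minSup_num, data,counts=[]):
-- 	for item in cur_pattern[:]:
-- 		num = 0
-- 		for line in data:
-- 			if Find_key_line(item,line) == True:
-- 				num = num+1
-- 		if num < minSup_num:
-- 			cur_pattern.remove(item)
--
-- 	return cur_pattern
--
-- def Find_key_line(item,line):
-- 	for number in item:
-- 		if number not in line:
-- 			return False
-- 	return True
-- ===== SOURCE B (Python) =====
-- def Get_Prune_Pattern(cur_pattern, minSup_num, data, counts=[]):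
--     # Inverted index: number -> list of indices of lines containing it (increasing).
--     postings = {}
--     for i, line in enumerate(data):
--         for number in dict.fromkeys(line):
--             postings.setdefault(number, []).append(i)
--     result = []
--     for item in cur_pattern:
--         keys = list(dict.fromkeys(item))
--         if not keys:
--             support = len(data)
--         else:
--             s = postings.get(keys[0], [])
--             for number in keys[1:]:
--                 ts = set(postings.get(number, []))
--                 s = [i for i in s if i in ts]
--             support = len(s)
--         if support >= minSup_num:
--             result.append(item)
--     return result
-- ===== Notes on version B (the rewrite author's own statement) =====
-- stated objective: faster
-- what changed: B replaces A's pattern-by-pattern rescan of every line (with in-place list.remove) by an inverted index number->posting list of line indices built once, computing each pattern's support as the size of the intersection of its numbers' posting lists and collecting survivors into a fresh list.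
import Mathlib
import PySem

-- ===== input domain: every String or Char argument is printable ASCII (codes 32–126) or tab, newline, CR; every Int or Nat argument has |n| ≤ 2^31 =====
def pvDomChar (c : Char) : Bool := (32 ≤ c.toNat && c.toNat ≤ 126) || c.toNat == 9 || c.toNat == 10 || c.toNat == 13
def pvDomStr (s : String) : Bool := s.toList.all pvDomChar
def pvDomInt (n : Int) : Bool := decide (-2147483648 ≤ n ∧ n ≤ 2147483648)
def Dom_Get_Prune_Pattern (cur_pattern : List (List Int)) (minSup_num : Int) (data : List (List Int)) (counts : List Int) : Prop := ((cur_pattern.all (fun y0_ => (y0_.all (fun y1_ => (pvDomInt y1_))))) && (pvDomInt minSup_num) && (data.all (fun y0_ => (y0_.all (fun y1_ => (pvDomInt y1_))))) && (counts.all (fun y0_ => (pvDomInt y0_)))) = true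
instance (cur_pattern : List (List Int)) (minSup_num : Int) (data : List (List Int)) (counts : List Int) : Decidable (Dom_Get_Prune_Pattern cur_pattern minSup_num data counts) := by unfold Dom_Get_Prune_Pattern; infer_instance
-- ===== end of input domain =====

-- B replaces A's per-pattern rescan of all lines by an inverted index (number -> posting
-- list of line indices) and computes support as the size of the intersection of posting
-- lists; equivalence is about the RETURN value only (A mutates cur_pattern in place, B does not).

-- ===== PORT A =====
def Find_key_line (item : List Int) (line : List Int) : Bool :=
  match item with
  | [] => true
  | number :: rest => if line.contains number then Find_key_line rest line else false

def Get_Prune_Pattern (cur_pattern : List (List Int)) (minSup_num : Int) (data : List (List Int)) (counts : List Int) : List (List Int) :=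
  -- for item in cur_pattern[:] … cur_pattern.remove(item); remove always succeeds here
  -- (item comes from the copy), so the total form (remove?).getD is exact.
  cur_pattern.foldl
    (fun acc item =>
      let num : Int := data.foldl (fun n line => if Find_key_line item line = true then n + 1 else n) 0
      if num < minSup_num then (PySem.List.remove? acc item).getD acc else acc)
    cur_pattern

-- ===== PORT B =====
-- postings.setdefault(number, []).append(i)  ==  postings[number] = postings.get(number, []) + [i]; Dict.modify is exactly this
def pvBuildPostings (data : List (List Int)) : PySem.Dict Int (List Int) :=
  (PySem.List.enumerate data).foldl
    (fun d p => (PySem.List.dedup p.2).foldl (fun d n => d.modify n [] (fun l => l ++ [p.1])) d)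
    PySem.Dict.empty

def pvSupport (postings : PySem.Dict Int (List Int)) (dataLen : Nat) (item : List Int) : Int :=
  -- keys = list(dict.fromkeys(item)): intersect each distinct number's posting list once
  match PySem.List.dedup item with
  | [] => (dataLen : Int)
  | n0 :: rest =>
      ((rest.foldl
          (fun s n => s.filter (fun i => (PySem.Set.ofList (postings.getD n [])).contains i))
          (postings.getD n0 [])).length : Int)

def Get_Prune_Pattern_alt (cur_pattern : List (List Int)) (minSup_num : Int) (data : List (List Int)) (counts : List Int) : List (List Int) :=
  let postings := pvBuildPostings data
  cur_pattern.foldl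
    (fun res item => if pvSupport postings data.length item ≥ minSup_num then res ++ [item] else res)
    []

-- ===== PRECONDITION & SPEC =====
def Spec_Get_Prune_Pattern (cur_pattern : List (List Int)) (minSup_num : Int) (data : List (List Int)) (counts : List Int) (out : List (List Int)) : Prop := out = Get_Prune_Pattern_alt cur_pattern minSup_num data counts
instance (cur_pattern : List (List Int)) (minSup_num : Int) (data : List (List Int)) (counts : List Int) (out : List (List Int)) : Decidable (Spec_Get_Prune_Pattern cur_pattern minSup_num data counts out) := by unfold Spec_Get_Prune_Pattern; infer_instance

-- ===== CLAIM (what is proved, stated in full; the proofs are below) =====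
def Claim_equal_Get_Prune_Pattern : Prop := ∀ (cur_pattern : List (List Int)) (minSup_num : Int) (data : List (List Int)) (counts : List Int), Dom_Get_Prune_Pattern cur_pattern minSup_num data counts → Spec_Get_Prune_Pattern cur_pattern minSup_num data counts (Get_Prune_Pattern cur_pattern minSup_num data counts)

-- ===== LEMMAS AND PROOFS =====

theorem findKey_eq_all (item line : List Int) :
    Find_key_line item line = item.all (fun n => line.contains n) := by
  induction item with
  | nil => rfl
  | cons n rest ih =>
      by_cases h : line.contains n = true <;> simp [Find_key_line, h, ih]

theorem countA (item : List Int) (data : List (List Int)) (c : Int) :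
    data.foldl (fun n line => if Find_key_line item line = true then n + 1 else n) c
      = c + data.countP (fun line => Find_key_line item line) := by
  induction data generalizing c with
  | nil => simp
  | cons l ls ih =>
      by_cases h : Find_key_line item l = true <;>
        simp [List.countP_cons, h, ih] <;> ring

theorem getD_inner (i : Int) (n : Int) :
    ∀ (ks : List Int) (d : PySem.Dict Int (List Int)), ks.Nodup →
      (ks.foldl (fun d m => d.modify m [] (fun l => l ++ [i])) d).getD n []
        = d.getD n [] ++ (if n ∈ ks then [i] else []) := by
  intro ks
  induction ks with
  | nil => simp
  | cons k ks ih =>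
      intro d hnd
      rcases List.nodup_cons.mp hnd with ⟨hk, hnd'⟩
      rw [List.foldl_cons, ih _ hnd']
      by_cases hnk : n = k
      · subst hnk
        simp [PySem.Dict.getD_modify, hk]
      · simp [PySem.Dict.getD_modify, hnk]

theorem getD_buildAux (n : Int) :
    ∀ (E : List (Int × List Int)) (d : PySem.Dict Int (List Int)),
      (E.foldl (fun d p => (PySem.List.dedup p.2).foldl (fun d m => d.modify m [] (fun l => l ++ [p.1])) d) d).getD n []
        = d.getD n [] ++ (E.filter (fun p => p.2.contains n)).map (·.1) := by
  intro E
  induction E with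
  | nil => simp
  | cons p E ih =>
      intro d
      rw [List.foldl_cons, ih, getD_inner _ _ _ _ (PySem.List.nodup_dedup _)]
      by_cases h : n ∈ p.2 <;>
        simp [List.filter_cons, h, PySem.List.mem_dedup]

theorem getD_build (data : List (List Int)) (n : Int) :
    (pvBuildPostings data).getD n []
      = ((PySem.List.enumerate data).filter (fun p => p.2.contains n)).map (·.1) := by
  unfold pvBuildPostings
  rw [getD_buildAux]
  simp

theorem nodup_fst_E (data : List (List Int)) :
    ((PySem.List.enumerate data).map (·.1)).Nodup := by
  rw [PySem.List.map_fst_enumerate]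
  exact PySem.List.nodup_pyRange_one _ _

theorem mem_map_fst_filter (data : List (List Int)) (q : Int × List Int → Bool)
    (p : Int × List Int) (hp : p ∈ PySem.List.enumerate data) :
    (p.1 ∈ ((PySem.List.enumerate data).filter q).map (·.1)) ↔ q p = true := by
  constructor
  · intro h
    rcases List.mem_map.mp h with ⟨r, hr, hfst⟩
    rcases List.mem_filter.mp hr with ⟨hrE, hq⟩
    have := List.inj_on_of_nodup_map (nodup_fst_E data) hrE hp hfst
    rwa [this] at hq
  · intro h
    exact List.mem_map.mpr ⟨p, List.mem_filter.mpr ⟨hp, h⟩, rfl⟩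

theorem inter_step (data : List (List Int)) (q : Int × List Int → Bool) (n : Int) :
    (((PySem.List.enumerate data).filter q).map (·.1)).filter
        (fun i => (PySem.Set.ofList ((pvBuildPostings data).getD n [])).contains i)
      = ((PySem.List.enumerate data).filter (fun p => q p && p.2.contains n)).map (·.1) := by
  rw [List.filter_map]
  congr 1
  rw [List.filter_filter]
  apply List.filter_congr
  intro p hp
  have hmem' : p.1 ∈ (pvBuildPostings data).getD n [] ↔ n ∈ p.2 := by
    rw [getD_build]
    constructor
    · intro h
      have := (mem_map_fst_filter data (fun r => r.2.contains n) p hp).mp h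
      simpa using this
    · intro h
      exact (mem_map_fst_filter data (fun r => r.2.contains n) p hp).mpr (by simpa using h)
  simp [Function.comp, hmem', Bool.and_comm]

theorem inter_invariant (data : List (List Int)) :
    ∀ (rest done : List Int),
      rest.foldl
        (fun s n => s.filter (fun i => (PySem.Set.ofList ((pvBuildPostings data).getD n [])).contains i))
        (((PySem.List.enumerate data).filter (fun p => done.all (fun n => p.2.contains n))).map (·.1))
      = ((PySem.List.enumerate data).filter (fun p => (done ++ rest).all (fun n => p.2.contains n))).map (·.1) := by
  intro rest
  induction rest with
  | nil => simp
  | cons n rest ih =>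
      intro done
      rw [List.foldl_cons, inter_step]
      have : (fun p : Int × List Int => done.all (fun m => p.2.contains m) && p.2.contains n)
           = (fun p : Int × List Int => (done ++ [n]).all (fun m => p.2.contains m)) := by
        funext p; simp
      rw [this, ih (done ++ [n])]
      simp

theorem all_dedup (l : List Int) (p : Int → Bool) :
    (PySem.List.dedup l).all p = l.all p := by
  by_cases h : l.all p = true
  · rw [h]
    rw [List.all_eq_true] at h ⊢
    exact fun x hx => h x ((PySem.List.mem_dedup l x).mp hx)
  · have h2 : ¬ (PySem.List.dedup l).all p = true := by
      rw [List.all_eq_true] at h ⊢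
      intro hall
      exact h (fun x hx => hall x ((PySem.List.mem_dedup l x).mpr hx))
    rw [Bool.not_eq_true] at h h2
    rw [h, h2]

theorem support_eq (data : List (List Int)) (item : List Int) :
    pvSupport (pvBuildPostings data) data.length item
      = (data.countP (fun line => item.all (fun n => line.contains n)) : Int) := by
  rcases hd : PySem.List.dedup item with _ | ⟨n0, rest⟩
  · have hitem : item = [] := by
      cases item with
      | nil => rfl
      | cons x xs =>
          have hx : x ∈ PySem.List.dedup (x :: xs) :=
            (PySem.List.mem_dedup (x :: xs) x).mpr List.mem_cons_self
          rw [hd] at hx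
          exact absurd hx List.not_mem_nil
    subst hitem
    simp [pvSupport, List.countP_eq_length]
  · simp only [pvSupport, hd]
    have h0 : (pvBuildPostings data).getD n0 []
        = ((PySem.List.enumerate data).filter (fun p => ([n0] : List Int).all (fun n => p.2.contains n))).map (·.1) := by
      rw [getD_build]; simp
    rw [h0, inter_invariant data rest [n0]]
    have hsnd : data = (PySem.List.enumerate data).map (·.2) :=
      (PySem.List.map_snd_enumerate _ _).symm
    rw [List.length_map, ← List.countP_eq_length_filter]
    conv_rhs => rw [hsnd]
    rw [List.countP_map]
    have hfun : (fun p : Int × List Int => ([n0] ++ rest).all fun n => p.2.contains n)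
        = ((fun line => item.all fun n => line.contains n) ∘ fun x => x.2) := by
      funext p
      simp only [Function.comp]
      show ((n0 :: rest).all fun n => p.2.contains n) = item.all fun n => p.2.contains n
      rw [← hd, all_dedup]
    rw [hfun]

theorem foldl_erase_filter {α : Type} [BEq α] [LawfulBEq α] (C : α → Prop) [DecidablePred C] :
    ∀ (l k : List α), (∀ x ∈ k, ¬ C x) →
      List.foldl (fun acc x => if C x then (PySem.List.remove? acc x).getD acc else acc) (k ++ l) l
        = k ++ l.filter (fun x => !decide (C x)) := by
  intro l
  induction l with
  | nil => intro k _; simp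
  | cons x rest ih =>
      intro k hk
      rw [List.foldl_cons]
      by_cases hx : C x
      · have hxk : x ∉ k := fun hmem => hk x hmem hx
        have hxmem : x ∈ k ++ x :: rest := by simp
        rw [if_pos hx, PySem.List.remove?_eq_some_erase _ _ hxmem, Option.getD_some,
            List.erase_append_right _ hxk, List.erase_cons_head]
        rw [ih k hk]
        simp [hx]
      · rw [if_neg hx]
        have : k ++ x :: rest = (k ++ [x]) ++ rest := by simp
        rw [this, ih (k ++ [x]) ?_]
        · simp [hx]
        · intro y hy
          rcases List.mem_append.mp hy with h | h
          · exact hk y h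
          · simp at h; subst h; exact hx

theorem portA_eq_filter (cur_pattern : List (List Int)) (minSup_num : Int) (data : List (List Int)) (counts : List Int) :
    Get_Prune_Pattern cur_pattern minSup_num data counts
      = cur_pattern.filter (fun item =>
          !decide ((data.countP (fun line => Find_key_line item line) : Int) < minSup_num)) := by
  unfold Get_Prune_Pattern
  have hstep : (fun (acc : List (List Int)) (item : List Int) =>
      let num : Int := data.foldl (fun n line => if Find_key_line item line = true then n + 1 else n) 0
      if num < minSup_num then (PySem.List.remove? acc item).getD acc else acc)
    = (fun acc item =>
      if (data.countP (fun line => Find_key_line item line) : Int) < minSup_num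
      then (PySem.List.remove? acc item).getD acc else acc) := by
    funext acc item
    simp only [countA item data 0, zero_add]
  rw [hstep]
  have := foldl_erase_filter (fun item : List Int =>
      (data.countP (fun line => Find_key_line item line) : Int) < minSup_num)
      cur_pattern [] (by simp)
  simpa using this

theorem portB_eq_filter (cur_pattern : List (List Int)) (minSup_num : Int) (data : List (List Int)) (counts : List Int) :
    Get_Prune_Pattern_alt cur_pattern minSup_num data counts
      = cur_pattern.filter (fun item =>
          decide (pvSupport (pvBuildPostings data) data.length item ≥ minSup_num)) := by
  unfold Get_Prune_Pattern_alt
  simp only []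
  rw [PySem.List.foldl_append_ite_eq_filter]
  simp

-- ===== VERDICT (by name: the statement is the Claim_ definition above) =====
theorem Get_Prune_Pattern_spec : Claim_equal_Get_Prune_Pattern := by
  intro cur_pattern minSup_num data counts _
  unfold Spec_Get_Prune_Pattern
  rw [portA_eq_filter _ _ _ counts, portB_eq_filter _ _ _ counts]
  apply List.filter_congr
  intro item _
  rw [support_eq]
  have : (fun line : List Int => Find_key_line item line)
       = (fun line : List Int => item.all (fun n => line.contains n)) := by
    funext line; exact findKey_eq_all item line
  rw [this]
  rw [← decide_not]
  exact decide_eq_decide.mpr (by omega)
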